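-- pv_equiv track=rewrite | github.com/mnb27/UG-Software-Lab | KDTree-KNN/2018CSB1069_kdtreeKNN.py | median_index
-- ===== SOURCE A (Python) =====
-- def median_index(point_set, idx):  # idx = 1 -> X=c   idx = 2 -> Y=c
--     sort_list = sorted(point_set, key = lambda x: x[idx])
--     l=len(sort_list)
--     if l%2==1:
--         k=l//2+1
--     else:
--         k=l//2
--     while k<l and sort_list[k-1][idx]==sort_list[k][idx]:
--         k=k+1
--     if k==l:
--         k=l-1
--         while k>1 and sort_list[k-1][idx]==sort_list[k][idx]:
--             k=k-1
--     return sort_list[:k], sort_list[k:], sort_list[k-1][idx]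
-- ===== SOURCE B (Python) =====
-- def median_index(point_set, idx):
--     # Same split as A, computed by counting instead of while-loops over neighbours.
--     s = sorted(point_set, key=lambda p: p[idx])
--     l = len(s)
--     pivot = s[(l + 1) // 2 - 1][idx]
--     k = sum(1 for p in s if p[idx] <= pivot)
--     if k == l:
--         start = sum(1 for p in s if p[idx] < s[-1][idx])
--         k = start if start >= 1 else (0 if l == 1 else 1)
--     return s[:k], s[k:], s[k - 1][idx]
-- ===== Notes on version B (the rewrite author's own statement) =====
-- stated objective: alternative
-- what changed: The neighbour-comparing forward/backward while-loops over the sorted list are replaced by direct rank counting: k = count of keys <= the initial median key, and in the all-equal-tail case the start of the final run = count of keys < the last key, clamped exactly as A clamps.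
import Mathlib
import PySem

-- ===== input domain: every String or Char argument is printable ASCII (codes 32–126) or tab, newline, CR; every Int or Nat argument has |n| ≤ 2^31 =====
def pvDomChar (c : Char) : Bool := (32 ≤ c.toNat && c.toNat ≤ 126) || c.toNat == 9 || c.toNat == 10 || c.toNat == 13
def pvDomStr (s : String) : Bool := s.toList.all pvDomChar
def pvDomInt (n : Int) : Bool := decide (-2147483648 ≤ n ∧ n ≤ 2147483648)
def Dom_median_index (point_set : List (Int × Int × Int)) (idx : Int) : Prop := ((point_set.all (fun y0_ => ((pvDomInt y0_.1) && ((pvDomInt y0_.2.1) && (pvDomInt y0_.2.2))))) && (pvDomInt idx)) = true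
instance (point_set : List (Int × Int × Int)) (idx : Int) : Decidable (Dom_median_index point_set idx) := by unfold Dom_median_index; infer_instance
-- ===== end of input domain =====

-- B replaces A's neighbour-comparing while-loops with rank counting (count of keys ≤ / < a value); equivalence proved on nonempty input with a valid tuple index.

-- p[idx] for a 3-tuple; exact for idx ∈ -3..2 (Python wraps negative indices), which Pre_ guarantees
def pvGetc (p : Int × Int × Int) (idx : Int) : Int :=
  if idx = 0 ∨ idx = -3 then p.1
  else if idx = 1 ∨ idx = -2 then p.2.1
  else p.2.2

-- sort_list[i][idx]; exact whenever the index is in range (guaranteed at every use under Pre_)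
def pvAt (s : List (Int × Int × Int)) (idx : Int) (i : Int) : Int :=
  pvGetc (PySem.List.pyGetD s i (0, 0, 0)) idx

-- ===== PORT A =====
-- while k<l and sort_list[k-1][idx]==sort_list[k][idx]: k=k+1
def pvFwd (s : List (Int × Int × Int)) (idx : Int) (l k : Nat) : Nat :=
  if h : k < l ∧ pvAt s idx ((k : Int) - 1) = pvAt s idx (k : Int) then pvFwd s idx l (k + 1)
  else k
termination_by l - k
decreasing_by obtain ⟨h1, -⟩ := h; omega

-- while k>1 and sort_list[k-1][idx]==sort_list[k][idx]: k=k-1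
def pvBwd (s : List (Int × Int × Int)) (idx : Int) (k : Nat) : Nat :=
  if h : 1 < k ∧ pvAt s idx ((k : Int) - 1) = pvAt s idx (k : Int) then pvBwd s idx (k - 1)
  else k
termination_by k
decreasing_by obtain ⟨h1, -⟩ := h; omega

def median_index (point_set : List (Int × Int × Int)) (idx : Int) : (List (Int × Int × Int)) × (List (Int × Int × Int)) × Int :=
  let s := PySem.List.sorted point_set (fun p => pvGetc p idx) false
  let l := s.length
  let k0 := if l % 2 = 1 then l / 2 + 1 else l / 2
  let k1 := pvFwd s idx l k0
  let k := if k1 = l then pvBwd s idx (l - 1) else k1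
  (s.take k, s.drop k, pvAt s idx ((k : Int) - 1))

-- ===== PORT B =====
def median_index_alt (point_set : List (Int × Int × Int)) (idx : Int) : (List (Int × Int × Int)) × (List (Int × Int × Int)) × Int :=
  let s := PySem.List.sorted point_set (fun p => pvGetc p idx) false
  let l := s.length
  let pivot := pvAt s idx (PySem.Int.floordiv ((l : Int) + 1) 2 - 1)
  let c := s.countP (fun p => decide (pvGetc p idx ≤ pivot))
  let k := if c = l then
      let start := s.countP (fun p => decide (pvGetc p idx < pvAt s idx (-1)))
      if 1 ≤ start then start else if l = 1 then 0 else 1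
    else c
  (s.take k, s.drop k, pvAt s idx ((k : Int) - 1))

-- ===== PRECONDITION & SPEC =====
-- A raises IndexError on an empty list and on a tuple index outside -3..2; Pre_ excludes exactly those.
def Pre_median_index (point_set : List (Int × Int × Int)) (idx : Int) : Prop :=
  point_set ≠ [] ∧ -3 ≤ idx ∧ idx < 3
instance (point_set : List (Int × Int × Int)) (idx : Int) : Decidable (Pre_median_index point_set idx) := by unfold Pre_median_index; infer_instance

def pvWitness_median_index : (List (Int × Int × Int)) × Int := ([(1, 2, 3), (0, 5, 4)], 1)

def Spec_median_index (point_set : List (Int × Int × Int)) (idx : Int) (out : (List (Int × Int × Int)) × (List (Int × Int × Int)) × Int) : Prop := out = median_index_alt point_set idx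
instance (point_set : List (Int × Int × Int)) (idx : Int) (out : (List (Int × Int × Int)) × (List (Int × Int × Int)) × Int) : Decidable (Spec_median_index point_set idx out) := by unfold Spec_median_index; infer_instance

-- ===== CLAIM (what is proved, stated in full; the proofs are below) =====
def Claim_equal_median_index : Prop := ∀ (point_set : List (Int × Int × Int)) (idx : Int), Dom_median_index point_set idx → Pre_median_index point_set idx → Spec_median_index point_set idx (median_index point_set idx)

-- ===== LEMMAS AND PROOFS =====

-- On a nondecreasing list, a downward-closed predicate holds exactly on the prefix of length countP.
theorem pvCount_char {t : List Int} (ht : t.Pairwise (· ≤ ·)) (P : Int → Bool)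
    (hmono : ∀ x y : Int, x ≤ y → P y = true → P x = true) (i : Nat) (hi : i < t.length) :
    (P t[i] = true ↔ i < t.countP P) := by
  induction t generalizing i with
  | nil => simp at hi
  | cons a t ih =>
    rw [List.pairwise_cons] at ht
    by_cases ha : P a = true
    · cases i with
      | zero => simpa [List.countP_cons, ha] using Nat.succ_pos _
      | succ j =>
        have hj : j < t.length := by simpa using hi
        have := ih ht.2 j hj
        simpa [List.countP_cons, ha, Nat.succ_lt_succ_iff] using this
    · have hct : t.countP P = 0 := by
        rw [List.countP_eq_zero]
        intro x hx hPx
        exact ha (hmono a x (ht.1 x hx) hPx)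
      cases i with
      | zero => simp [List.countP_cons, ha, hct]
      | succ j =>
        have hj : j < t.length := by simpa using hi
        have hx : t[j] ∈ t := List.getElem_mem hj
        constructor
        · intro hP
          exact absurd (hmono a _ (ht.1 _ hx) (by simpa using hP)) ha
        · intro hlt
          simp [List.countP_cons, ha, hct] at hlt

theorem pvPairwise_mono {t : List Int} (ht : t.Pairwise (· ≤ ·)) {i j : Nat}
    (hij : i ≤ j) (hj : j < t.length) : t[i]'(by omega) ≤ t[j] := by
  rcases Nat.lt_or_ge i j with h | h
  · exact (List.pairwise_iff_getElem.1 ht) i j (by omega) hj h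
  · have : i = j := by omega
    subst this; exact le_refl _

-- bridge: pvAt at a nonnegative in-range index is the mapped-coordinate list entry
theorem pvAt_eq {s : List (Int × Int × Int)} {idx : Int} (i : Nat) (hi : i < s.length) :
    pvAt s idx ((i : Nat) : Int) = (s.map (fun p => pvGetc p idx))[i]'(by simpa using hi) := by
  simp [pvAt, PySem.List.pyGetD_natCast, List.getD_eq_getElem?_getD, List.getElem?_eq_getElem hi]

theorem pvFwd_main {s : List (Int × Int × Int)} {idx : Int} (t : List Int)
    (htdef : t = s.map (fun p => pvGetc p idx)) (ht : t.Pairwise (· ≤ ·))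
    (pivot : Int) (m : Nat) (hm : m = t.countP (fun x => decide (x ≤ pivot)))
    (n : Nat) (k : Nat) (hn : m - k = n) (hk1 : 1 ≤ k) (hkm : k ≤ m)
    (hpk : t[k - 1]'(by
      have := List.countP_le_length (l := t) (p := fun x => decide (x ≤ pivot))
      omega) = pivot) :
    pvFwd s idx s.length k = m := by
  have hlen : t.length = s.length := by rw [htdef, List.length_map]
  have hml : m ≤ s.length := by
    have := List.countP_le_length (l := t) (p := fun x => decide (x ≤ pivot))
    omega
  induction n generalizing k with
  | zero =>
    have hkm' : k = m := by omega
    subst hkm'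
    rw [pvFwd]
    rw [dif_neg]
    rintro ⟨hkl, heq⟩
    have hkt : k < t.length := by omega
    have hA : pvAt s idx ((k : Int) - 1) = t[k - 1]'(by omega) := by
      have hcast : ((k : Int) - 1) = ((k - 1 : Nat) : Int) := by omega
      rw [hcast, pvAt_eq (k - 1) (by omega)]
      simp [htdef]
    have hB : pvAt s idx (k : Int) = t[k]'hkt := by
      rw [pvAt_eq k (by omega)]; simp [htdef]
    rw [hA, hB, hpk] at heq
    have hnle : ¬ (decide (t[k]'hkt ≤ pivot) = true) := by
      intro hle
      have := (pvCount_char ht (fun x => decide (x ≤ pivot))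
        (fun x y hxy hy => by simp at hy ⊢; omega) k hkt).1 hle
      omega
    simp at hnle
    omega
  | succ n ih =>
    have hklt : k < m := by omega
    have hkl : k < s.length := by omega
    have hkt : k < t.length := by omega
    have hA : pvAt s idx ((k : Int) - 1) = t[k - 1]'(by omega) := by
      have hcast : ((k : Int) - 1) = ((k - 1 : Nat) : Int) := by omega
      rw [hcast, pvAt_eq (k - 1) (by omega)]
      simp [htdef]
    have hB : pvAt s idx (k : Int) = t[k]'hkt := by
      rw [pvAt_eq k (by omega)]; simp [htdef]
    have hle : t[k]'hkt ≤ pivot := by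
      have := (pvCount_char ht (fun x => decide (x ≤ pivot))
        (fun x y hxy hy => by simp at hy ⊢; omega) k hkt).2 (by omega)
      simpa using this
    have hge : pivot ≤ t[k]'hkt := hpk ▸ pvPairwise_mono ht (by omega) hkt
    have heqv : t[k]'hkt = pivot := le_antisymm hle hge
    rw [pvFwd, dif_pos ⟨hkl, by rw [hA, hB, hpk, heqv]⟩]
    exact ih (k + 1) (by omega) (by omega) (by omega) (by simpa using heqv)

theorem pvBwd_stop {s : List (Int × Int × Int)} {idx : Int} (t : List Int)
    (htdef : t = s.map (fun p => pvGetc p idx)) (ht : t.Pairwise (· ≤ ·))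
    (pivot : Int) (st : Nat) (hst : st = t.countP (fun x => decide (x < pivot)))
    (hall : ∀ (i : Nat) (hi : i < t.length), st ≤ i → t[i] = pivot)
    (n : Nat) (k : Nat) (hn : k - st = n) (hstk : st ≤ k) (hk : k < s.length) (hst1 : 1 ≤ st) :
    pvBwd s idx k = st := by
  have hlen : t.length = s.length := by rw [htdef, List.length_map]
  have hstt : st ≤ t.length := by
    have := List.countP_le_length (l := t) (p := fun x => decide (x < pivot))
    omega
  induction n generalizing k with
  | zero =>
    have hkst : k = st := by omega
    subst hkst
    rw [pvBwd, dif_neg]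
    rintro ⟨h1k, heq⟩
    have hA : pvAt s idx ((k : Int) - 1) = t[k - 1]'(by omega) := by
      have hcast : ((k : Int) - 1) = ((k - 1 : Nat) : Int) := by omega
      rw [hcast, pvAt_eq (k - 1) (by omega)]; simp [htdef]
    have hB : pvAt s idx (k : Int) = t[k]'(by omega) := by
      rw [pvAt_eq k hk]; simp [htdef]
    have hlt : t[k - 1]'(by omega) < pivot := by
      have := (pvCount_char ht (fun x => decide (x < pivot))
        (fun x y hxy hy => by simp at hy ⊢; omega) (k - 1) (by omega)).2 (by omega)
      simpa using this
    have hkeq : t[k]'(by omega) = pivot := hall k (by omega) (by omega)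
    rw [hA, hB, hkeq] at heq
    omega
  | succ n ih =>
    have hklt : st < k := by omega
    have hA : pvAt s idx ((k : Int) - 1) = t[k - 1]'(by omega) := by
      have hcast : ((k : Int) - 1) = ((k - 1 : Nat) : Int) := by omega
      rw [hcast, pvAt_eq (k - 1) (by omega)]; simp [htdef]
    have hB : pvAt s idx (k : Int) = t[k]'(by omega) := by
      rw [pvAt_eq k hk]; simp [htdef]
    have h1 : t[k - 1]'(by omega) = pivot := hall (k - 1) (by omega) (by omega)
    have h2 : t[k]'(by omega) = pivot := hall k (by omega) (by omega)
    rw [pvBwd, dif_pos ⟨by omega, by rw [hA, hB, h1, h2]⟩]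
    exact ih (k - 1) (by omega) (by omega) (by omega)

theorem pvBwd_all_eq {s : List (Int × Int × Int)} {idx : Int} (t : List Int)
    (htdef : t = s.map (fun p => pvGetc p idx))
    (hall : ∀ (i j : Nat) (hi : i < t.length) (hj : j < t.length), t[i] = t[j])
    (n : Nat) (k : Nat) (hn : k = n) (hk1 : 1 ≤ k) (hk : k < s.length) :
    pvBwd s idx k = 1 := by
  have hlen : t.length = s.length := by rw [htdef, List.length_map]
  induction n generalizing k with
  | zero => omega
  | succ n ih =>
    by_cases h1 : 1 < k
    · have hA : pvAt s idx ((k : Int) - 1) = t[k - 1]'(by omega) := by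
        have hcast : ((k : Int) - 1) = ((k - 1 : Nat) : Int) := by omega
        rw [hcast, pvAt_eq (k - 1) (by omega)]; simp [htdef]
      have hB : pvAt s idx (k : Int) = t[k]'(by omega) := by
        rw [pvAt_eq k hk]; simp [htdef]
      rw [pvBwd, dif_pos ⟨h1, by rw [hA, hB]; exact hall _ _ _ _⟩]
      exact ih (k - 1) (by omega) (by omega) (by omega)
    · have hk1' : k = 1 := by omega
      subst hk1'
      rw [pvBwd, dif_neg]
      rintro ⟨h, -⟩; omega

-- The two computations of the split index agree on a nonempty list sorted by the key.
theorem pvK_eq (s : List (Int × Int × Int)) (idx : Int) (hsne : s ≠ [])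
    (ht : (s.map (fun p => pvGetc p idx)).Pairwise (· ≤ ·)) :
    (if pvFwd s idx s.length (if s.length % 2 = 1 then s.length / 2 + 1 else s.length / 2) = s.length
       then pvBwd s idx (s.length - 1)
       else pvFwd s idx s.length (if s.length % 2 = 1 then s.length / 2 + 1 else s.length / 2))
    = (if s.countP (fun p => decide (pvGetc p idx ≤ pvAt s idx (PySem.Int.floordiv ((s.length : Int) + 1) 2 - 1))) = s.length
         then (if 1 ≤ s.countP (fun p => decide (pvGetc p idx < pvAt s idx (-1)))
                 then s.countP (fun p => decide (pvGetc p idx < pvAt s idx (-1)))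
                 else if s.length = 1 then 0 else 1)
         else s.countP (fun p => decide (pvGetc p idx ≤ pvAt s idx (PySem.Int.floordiv ((s.length : Int) + 1) 2 - 1)))) := by
  have hl1 : 1 ≤ s.length := by
    have := List.length_pos_iff.mpr hsne; omega
  set t : List Int := s.map (fun p => pvGetc p idx) with htdef
  have hlen : t.length = s.length := by rw [htdef, List.length_map]
  set k0 : Nat := if s.length % 2 = 1 then s.length / 2 + 1 else s.length / 2 with hk0
  have hk0v : k0 = (s.length + 1) / 2 := by rw [hk0]; split <;> omega
  have hk01 : 1 ≤ k0 := by omega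
  have hk0l : k0 ≤ s.length := by omega
  have hfd : PySem.Int.floordiv ((s.length : Int) + 1) 2 - 1 = (((k0 - 1 : Nat)) : Int) := by
    have hc1 : ((s.length : Int) + 1) = ((s.length + 1 : Nat) : Int) := by push_cast; ring
    have hc2 : ((2 : Int)) = ((2 : Nat) : Int) := by norm_num
    rw [hc1, hc2, PySem.Int.floordiv_natCast]
    omega
  set pivot := pvAt s idx (PySem.Int.floordiv ((s.length : Int) + 1) 2 - 1) with hpiv
  have hpivt : pivot = t[k0 - 1]'(by omega) := by
    rw [hpiv, hfd, pvAt_eq (k0 - 1) (by omega)]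
  set m := t.countP (fun x => decide (x ≤ pivot)) with hm
  have hcount : s.countP (fun p => decide (pvGetc p idx ≤ pivot)) = m := by
    rw [hm, htdef, List.countP_map]; rfl
  have hml : m ≤ s.length := by
    have := List.countP_le_length (l := t) (p := fun x => decide (x ≤ pivot))
    omega
  have hk0m : k0 ≤ m := by
    have := (pvCount_char ht (fun x => decide (x ≤ pivot))
      (fun x y hxy hy => by simp at hy ⊢; omega) (k0 - 1) (by omega)).1
      (by rw [← hpivt]; simp)
    omega
  have hfwd : pvFwd s idx s.length k0 = m :=
    pvFwd_main t htdef ht pivot m hm (m - k0) k0 rfl hk01 hk0m hpivt.symm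
  rw [hfwd, hcount]
  by_cases hcase : m = s.length
  · rw [if_pos hcase, if_pos hcase]
    have hallle : ∀ (i : Nat) (hi : i < t.length), t[i] ≤ pivot := by
      intro i hi
      have := (pvCount_char ht (fun x => decide (x ≤ pivot))
        (fun x y hxy hy => by simp at hy ⊢; omega) i hi).2 (by omega)
      simpa using this
    have hlast : pvAt s idx (-1) = pivot := by
      have h1 : pvAt s idx (-1) = t[s.length - 1]'(by omega) := by
        rw [pvAt, PySem.List.pyGetD_neg_one s (0, 0, 0) hsne, List.getLast_eq_getElem]
        simp [htdef]
      rw [h1]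
      exact le_antisymm (hallle _ _) (hpivt ▸ pvPairwise_mono ht (by omega) (by omega))
    rw [hlast]
    set st := t.countP (fun x => decide (x < pivot)) with hstd
    have hcount2 : s.countP (fun p => decide (pvGetc p idx < pivot)) = st := by
      rw [hstd, htdef, List.countP_map]; rfl
    rw [hcount2]
    have hstk0 : st ≤ k0 - 1 := by
      by_contra hcon
      have := (pvCount_char ht (fun x => decide (x < pivot))
        (fun x y hxy hy => by simp at hy ⊢; omega) (k0 - 1) (by omega)).2 (by omega)
      rw [← hpivt] at this
      simp at this
    have halltail : ∀ (i : Nat) (hi : i < t.length), st ≤ i → t[i] = pivot := by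
      intro i hi hsti
      refine le_antisymm (hallle i hi) ?_
      by_contra hcon
      have hlt : t[i] < pivot := by omega
      have := (pvCount_char ht (fun x => decide (x < pivot))
        (fun x y hxy hy => by simp at hy ⊢; omega) i hi).1 (by simpa using hlt)
      omega
    by_cases hst1 : 1 ≤ st
    · have hbwd : pvBwd s idx (s.length - 1) = st := by
        rcases Nat.lt_or_ge (s.length - 1) st with hbad | hok
        · exfalso
          have := halltail (s.length - 1) (by omega) (by omega)
          have := (pvCount_char ht (fun x => decide (x < pivot))
            (fun x y hxy hy => by simp at hy ⊢; omega) (s.length - 1) (by omega)).2 (by omega)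
          simp [halltail (s.length - 1) (by omega) (by omega)] at this
        · exact pvBwd_stop t htdef ht pivot st hstd halltail ((s.length - 1) - st)
            (s.length - 1) rfl hok (by omega) hst1
      rw [hbwd, if_pos hst1]
    · have hst0 : st = 0 := by omega
      have hall2 : ∀ (i j : Nat) (hi : i < t.length) (hj : j < t.length), t[i] = t[j] := by
        intro i j hi hj
        rw [halltail i hi (by omega), halltail j hj (by omega)]
      rw [if_neg hst1]
      by_cases hl1' : s.length = 1
      · have hz : s.length - 1 = 0 := by omega
        rw [hz, pvBwd, dif_neg (by rintro ⟨h, -⟩; omega), if_pos hl1']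
      · have hbwd : pvBwd s idx (s.length - 1) = 1 :=
          pvBwd_all_eq t htdef hall2 (s.length - 1) (s.length - 1) rfl (by omega) (by omega)
        rw [hbwd, if_neg hl1']
  · rw [if_neg hcase, if_neg hcase]

-- ===== VERDICT (by name: the statement is the Claim_ definition above) =====
theorem median_index_spec : Claim_equal_median_index := by
  intro ps idx _ hpre
  obtain ⟨hne, -, -⟩ := hpre
  unfold Spec_median_index median_index median_index_alt
  have hsne : PySem.List.sorted ps (fun p => pvGetc p idx) false ≠ [] := by
    rw [Ne, PySem.List.sorted_eq_nil_iff]; exact hne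
  have ht : ((PySem.List.sorted ps (fun p => pvGetc p idx) false).map
      (fun p => pvGetc p idx)).Pairwise (· ≤ ·) :=
    PySem.List.sorted_map_key_pairwise ps (fun p => pvGetc p idx)
  have hk := pvK_eq _ idx hsne ht
  simp only [hk]
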